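-- pv_equiv track=rewrite | github.com/EphramGR/Antarchist | jsonHelper/jsonEditor.py | side_inverse
-- ===== SOURCE A (Python) =====
-- importantList = ['Y|rr', 'y|RR', 'r|YY', 'R|yy', 'b|Y|r', 'b|y|R', 'b|R|y', 'b|r|Y']
--
-- def side_inverse(pattern):
--     if pattern in importantList:
--         if pattern[0] == "b":
--             if "r" in pattern:
--                 return ["b|rr"]
--             else:
--                 return ["b|yy"]
--         elif pattern[-1] == "b":
--             if "r" in pattern:
--                 return ["rr|b"]
--             else:
--                 return ["yy|b"]
--         elif "r" in pattern:
--             return ["rrr"]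
--         else:
--             return ["yyy"]
--
--     elif pattern in ["b|rr", "b|yy", "rr|b", "yy|b", "rrr", "yyy"]:
--         if pattern == "yyy":
--             return ['y|RR', 'R|yy', 'yyy']
--         elif pattern == "rrr":
--             return ['Y|rr', 'r|YY', 'rrr']
--         elif pattern == "yy|b":
--             return ['R|y|b', 'y|R|b', 'yy|b']
--         elif pattern == "rr|b":
--             return ['Y|r|b', 'r|Y|b', 'rr|b']
--         elif pattern == "b|yy":
--             return ['b|y|R', 'b|R|y', 'b|yy']
--         else:
--             return ['b|Y|r', 'b|r|Y', 'b|rr']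
--
--     else:
--         inverse_pattern = ""
--         for i in range(len(pattern)):
--             if pattern[i] in ['Y', 'R']:
--                 if pattern[i] == 'Y':
--                     inverse_pattern += 'R'
--                 else:
--                     inverse_pattern += 'Y'
--             else:
--                 inverse_pattern += pattern[i]
--         return [inverse_pattern]
-- ===== SOURCE B (Python) =====
-- SPECIAL = {
--     'Y|rr': ['rrr'], 'y|RR': ['yyy'], 'r|YY': ['rrr'], 'R|yy': ['yyy'],
--     'b|Y|r': ['b|rr'], 'b|y|R': ['b|yy'], 'b|R|y': ['b|yy'], 'b|r|Y': ['b|rr'],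
--     'yyy': ['y|RR', 'R|yy', 'yyy'],
--     'rrr': ['Y|rr', 'r|YY', 'rrr'],
--     'yy|b': ['R|y|b', 'y|R|b', 'yy|b'],
--     'rr|b': ['Y|r|b', 'r|Y|b', 'rr|b'],
--     'b|yy': ['b|y|R', 'b|R|y', 'b|yy'],
--     'b|rr': ['b|Y|r', 'b|r|Y', 'b|rr'],
-- }
--
-- _SWAP = str.maketrans('YR', 'RY')
--
-- def side_inverse(pattern):
--     if pattern in SPECIAL:
--         return list(SPECIAL[pattern])
--     return [pattern.translate(_SWAP)]
-- ===== Notes on version B (the rewrite author's own statement) =====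
-- stated objective: simpler
-- what changed: Replaces the two nested-conditional dispatch blocks (membership test plus re-derived first/last-char and substring checks) with a single precomputed 14-entry lookup table, and the per-index character-concatenation loop with one str.translate call.
import Mathlib
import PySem

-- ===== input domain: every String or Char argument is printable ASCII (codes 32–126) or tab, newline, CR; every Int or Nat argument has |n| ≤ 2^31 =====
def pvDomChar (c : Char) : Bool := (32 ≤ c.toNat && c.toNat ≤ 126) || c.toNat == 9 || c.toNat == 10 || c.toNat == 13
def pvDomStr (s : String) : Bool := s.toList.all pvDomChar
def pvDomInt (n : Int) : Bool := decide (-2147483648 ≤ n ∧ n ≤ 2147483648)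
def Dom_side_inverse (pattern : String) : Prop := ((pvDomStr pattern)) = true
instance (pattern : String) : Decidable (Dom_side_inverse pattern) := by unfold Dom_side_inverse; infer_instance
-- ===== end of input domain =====

-- B replaces A's nested-conditional special-case dispatch with one 14-entry lookup table
-- and the per-index loop with a single character-map (translate); objective: simpler.

-- ===== PORT A =====
def importantList : List String := ["Y|rr", "y|RR", "r|YY", "R|yy", "b|Y|r", "b|y|R", "b|R|y", "b|r|Y"]

def side_inverse (pattern : String) : List String :=
  if pattern ∈ importantList then
    if PySem.Str.pyGet? pattern 0 = some 'b' then
      if PySem.Str.isIn "r" pattern then ["b|rr"] else ["b|yy"]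
    else if PySem.Str.pyGet? pattern (-1) = some 'b' then
      if PySem.Str.isIn "r" pattern then ["rr|b"] else ["yy|b"]
    else if PySem.Str.isIn "r" pattern then ["rrr"]
    else ["yyy"]
  else if pattern ∈ ["b|rr", "b|yy", "rr|b", "yy|b", "rrr", "yyy"] then
    if pattern = "yyy" then ["y|RR", "R|yy", "yyy"]
    else if pattern = "rrr" then ["Y|rr", "r|YY", "rrr"]
    else if pattern = "yy|b" then ["R|y|b", "y|R|b", "yy|b"]
    else if pattern = "rr|b" then ["Y|r|b", "r|Y|b", "rr|b"]
    else if pattern = "b|yy" then ["b|y|R", "b|R|y", "b|yy"]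
    else ["b|Y|r", "b|r|Y", "b|rr"]
  else
    -- the loop 'for i in range(len(pattern))' reading pattern[i] is a fold over the characters
    [String.ofList (pattern.toList.foldl
      (fun acc c =>
        if c == 'Y' || c == 'R' then
          if c == 'Y' then acc ++ ['R'] else acc ++ ['Y']
        else acc ++ [c]) [])]

-- ===== PORT B =====
def specialTable : PySem.Dict String (List String) :=
  PySem.Dict.ofList [("Y|rr", ["rrr"]), ("y|RR", ["yyy"]), ("r|YY", ["rrr"]), ("R|yy", ["yyy"]),
   ("b|Y|r", ["b|rr"]), ("b|y|R", ["b|yy"]), ("b|R|y", ["b|yy"]), ("b|r|Y", ["b|rr"]),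
   ("yyy", ["y|RR", "R|yy", "yyy"]), ("rrr", ["Y|rr", "r|YY", "rrr"]),
   ("yy|b", ["R|y|b", "y|R|b", "yy|b"]), ("rr|b", ["Y|r|b", "r|Y|b", "rr|b"]),
   ("b|yy", ["b|y|R", "b|R|y", "b|yy"]), ("b|rr", ["b|Y|r", "b|r|Y", "b|rr"])]

def swapChar (c : Char) : Char :=
  if c = 'Y' then 'R' else if c = 'R' then 'Y' else c

def side_inverse_alt (pattern : String) : List String :=
  match PySem.Dict.get? specialTable pattern with
  | some v => v
  | none => [String.ofList (pattern.toList.map swapChar)]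

-- ===== PRECONDITION & SPEC =====
def Spec_side_inverse (pattern : String) (out : List String) : Prop := out = side_inverse_alt pattern
instance (pattern : String) (out : List String) : Decidable (Spec_side_inverse pattern out) := by unfold Spec_side_inverse; infer_instance

-- ===== CLAIM (what is proved, stated in full; the proofs are below) =====
def Claim_equal_side_inverse : Prop := ∀ (pattern : String), Dom_side_inverse pattern → Spec_side_inverse pattern (side_inverse pattern)

-- ===== LEMMAS AND PROOFS =====

-- A's generic loop equals a map of swapChar over the characters
theorem fold_swap (l acc : List Char) :
    l.foldl (fun acc c =>
        if c == 'Y' || c == 'R' then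
          if c == 'Y' then acc ++ ['R'] else acc ++ ['Y']
        else acc ++ [c]) acc = acc ++ l.map swapChar := by
  induction l generalizing acc with
  | nil => simp
  | cons c t ih =>
    simp only [List.foldl_cons, List.map_cons, ih]
    by_cases hY : c = 'Y'
    · simp [hY, swapChar]
    · by_cases hR : c = 'R' <;> simp [hY, hR, swapChar]

-- ===== VERDICT (by name: the statement is the Claim_ definition above) =====
theorem side_inverse_spec : Claim_equal_side_inverse := by
  intro pattern _
  unfold Spec_side_inverse
  by_cases h1 : pattern = "Y|rr"; · subst h1; decide
  by_cases h2 : pattern = "y|RR"; · subst h2; decide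
  by_cases h3 : pattern = "r|YY"; · subst h3; decide
  by_cases h4 : pattern = "R|yy"; · subst h4; decide
  by_cases h5 : pattern = "b|Y|r"; · subst h5; decide
  by_cases h6 : pattern = "b|y|R"; · subst h6; decide
  by_cases h7 : pattern = "b|R|y"; · subst h7; decide
  by_cases h8 : pattern = "b|r|Y"; · subst h8; decide
  by_cases h9 : pattern = "b|rr"; · subst h9; decide
  by_cases h10 : pattern = "b|yy"; · subst h10; decide
  by_cases h11 : pattern = "rr|b"; · subst h11; decide
  by_cases h12 : pattern = "yy|b"; · subst h12; decide
  by_cases h13 : pattern = "rrr"; · subst h13; decide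
  by_cases h14 : pattern = "yyy"; · subst h14; decide
  have hA : pattern ∉ importantList := by
    simp [importantList, h1, h2, h3, h4, h5, h6, h7, h8]
  have hA2 : pattern ∉ (["b|rr", "b|yy", "rr|b", "yy|b", "rrr", "yyy"] : List String) := by
    simp [h9, h10, h11, h12, h13, h14]
  have hit : specialTable.items =
      [("Y|rr", ["rrr"]), ("y|RR", ["yyy"]), ("r|YY", ["rrr"]), ("R|yy", ["yyy"]),
       ("b|Y|r", ["b|rr"]), ("b|y|R", ["b|yy"]), ("b|R|y", ["b|yy"]), ("b|r|Y", ["b|rr"]),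
       ("yyy", ["y|RR", "R|yy", "yyy"]), ("rrr", ["Y|rr", "r|YY", "rrr"]),
       ("yy|b", ["R|y|b", "y|R|b", "yy|b"]), ("rr|b", ["Y|r|b", "r|Y|b", "rr|b"]),
       ("b|yy", ["b|y|R", "b|R|y", "b|yy"]), ("b|rr", ["b|Y|r", "b|r|Y", "b|rr"])] := by
    decide
  have hB : PySem.Dict.get? specialTable pattern = none := by
    simp [PySem.Dict.get?, hit, Ne.symm h1, Ne.symm h2, Ne.symm h3, Ne.symm h4, Ne.symm h5,
      Ne.symm h6, Ne.symm h7, Ne.symm h8, Ne.symm h9, Ne.symm h10, Ne.symm h11, Ne.symm h12,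
      Ne.symm h13, Ne.symm h14]
  simp only [side_inverse, side_inverse_alt, hB, if_neg hA, if_neg hA2]
  rw [fold_swap]
  simp
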